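-- pv_equiv track=rewrite | github.com/Sushovan0777/python-freecodecamp | python/freecampcode_projects/airthmetic_arranger.py | vertical_arranger
-- ===== SOURCE A (Python) =====
-- def max_length(num1,num2):
--     num1=str(num1)
--     num2=str(num2)
--     if len(num1)>len(num2):
--         return len(num1)
--     elif len(num2)>len(num1):
--         return len(num2)
--     elif len(num1)==len(num2):
--         return len(num1)
--
-- def vertical_arranger(num1,num2,operator,show_answer=False):
--     top=""
--     bottoms =""
--     banners =""
--     answers =""
--     for i in range(len(num1)):
--         max=max_length(num1[i],num2[i])
--         if len(num1[i])>=len(num2[i]):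
--             top+='  '+num1[i]
--         else:
--             space=2+len(num2[i])-len(num1[i])
--             top+=' '*space+num1[i]
--         if len(num2[i])>=len(num1[i]):
--             bottoms+=operator[i]+' '+num2[i]
--         else:
--             space=len(num1[i])-len(num2[i])
--             bottoms+=operator[i] + ' ' + ' '*space + num2[i]
--         banners+='-'*(max+2)
--         top+='    '
--         bottoms+='    '
--         banners+='    '
--     if show_answer:
--         for i in range(len(num1)):
--             max=max_length(int(num1[i]),int(num2[i]))
--             digits=max+2
--             if operator[i] == "+":
--                 answer =int(num1[i])+int(num2[i])
--
--             else:
--                 answer =int(num1[i])-int(num2[i])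
--             space = digits - len(str(answer))
--             answers+=' '*space+str(answer)+'    '
--         format=f"{top}\n{bottoms}\n{banners}\n{answers}"
--     else:
--         format=f"{top}\n{bottoms}\n{banners}\n"
--
--     return format
-- ===== SOURCE B (Python) =====
-- def vertical_arranger(num1, num2, operator, show_answer=False):
--     # One pass builds a 4-field block per problem (cells made by %-formatting);
--     # the four display lines are then obtained by transposing the block list.
--     blocks = []
--     for a, b, op in zip(num1, num2, operator):
--         w = max(len(a), len(b))
--         if show_answer:
--             x, y = int(a), int(b)
--             r = x + y if op == '+' else x - y
--             an = '%*d    ' % (max(len(str(x)), len(str(y))) + 2, r)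
--         else:
--             an = ''
--         blocks.append(('%*s    ' % (w + 2, a),
--                        '%s %*s    ' % (op, w, b),
--                        '-' * (w + 2) + '    ',
--                        an))
--     rows = [''.join(row) for row in zip(*blocks)] if blocks else ['', '', '', '']
--     return '\n'.join(rows)
-- ===== Notes on version B (the rewrite author's own statement) =====
-- stated objective: alternative
-- what changed: Replaces A's two forward index loops mutating four string accumulators by a single pass that builds a 4-field block per problem via %-format strings and then transposes the block list (zip(*blocks)) into the four lines (the answer cell kept on the int-based width so leading-zero inputs behave identically).
import Mathlib
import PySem

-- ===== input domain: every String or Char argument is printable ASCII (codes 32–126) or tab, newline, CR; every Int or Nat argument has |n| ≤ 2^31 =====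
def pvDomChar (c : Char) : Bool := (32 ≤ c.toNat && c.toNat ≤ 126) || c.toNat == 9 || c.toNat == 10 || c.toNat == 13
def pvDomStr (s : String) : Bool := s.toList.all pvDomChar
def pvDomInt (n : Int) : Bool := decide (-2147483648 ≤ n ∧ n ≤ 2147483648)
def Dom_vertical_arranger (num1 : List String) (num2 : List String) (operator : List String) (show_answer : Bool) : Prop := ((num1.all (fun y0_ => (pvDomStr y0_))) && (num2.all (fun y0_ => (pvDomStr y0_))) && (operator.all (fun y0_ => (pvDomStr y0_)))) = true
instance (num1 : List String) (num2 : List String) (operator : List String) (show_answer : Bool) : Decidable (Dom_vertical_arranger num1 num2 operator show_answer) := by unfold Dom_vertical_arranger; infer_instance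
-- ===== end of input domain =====

-- B replaces A's two forward index loops over four mutated string accumulators by one pass
-- building a 4-field block per problem, the four lines then read off by transposing the block
-- list (objective: alternative decomposition, same cost).

-- ===== PORT A =====
-- max_length: Python applies str() to its arguments first; both call sites below pass the
-- already-converted string (identity for the first loop, str(int(...)) for the answer loop).
def pvMaxLenChain (a : List Char) (b : List Char) : Int :=
  if PySem.List.len a > PySem.List.len b then PySem.List.len a
  else if PySem.List.len b > PySem.List.len a then PySem.List.len b
  else PySem.List.len a

def vertical_arranger (num1 : List String) (num2 : List String) (operator : List String) (show_answer : Bool) : String :=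
  -- first loop: accumulates (top, bottoms, banners); ' '*k with k ≤ 0 is "" in Python, matched by .toNat
  let s0 := (PySem.List.pyRange 0 (PySem.List.len num1) 1).foldl
    (fun (acc : List Char × List Char × List Char) i =>
      let a := (PySem.List.pyGetD num1 i "").toList
      let b := (PySem.List.pyGetD num2 i "").toList
      let op := (PySem.List.pyGetD operator i "").toList
      let mx := pvMaxLenChain a b
      let top := acc.1 ++ (if PySem.List.len a ≥ PySem.List.len b then [' ', ' '] ++ a
                 else List.replicate (2 + PySem.List.len b - PySem.List.len a).toNat ' ' ++ a)
      let bottoms := acc.2.1 ++ (if PySem.List.len b ≥ PySem.List.len a then op ++ [' '] ++ b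
                 else op ++ [' '] ++ List.replicate (PySem.List.len a - PySem.List.len b).toNat ' ' ++ b)
      let banners := acc.2.2 ++ List.replicate (mx + 2).toNat '-'
      (top ++ [' ', ' ', ' ', ' '], bottoms ++ [' ', ' ', ' ', ' '], banners ++ [' ', ' ', ' ', ' ']))
    ([], [], [])
  -- second loop (only under show_answer): int() raising ValueError is excluded by Pre_, so .getD 0 is never hit
  let answers : List Char := if show_answer then
      (PySem.List.pyRange 0 (PySem.List.len num1) 1).foldl
        (fun acc i =>
          let x := (PySem.Int.ofStr? (PySem.List.pyGetD num1 i "")).getD 0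
          let y := (PySem.Int.ofStr? (PySem.List.pyGetD num2 i "")).getD 0
          let mx := pvMaxLenChain (PySem.Int.toChars x) (PySem.Int.toChars y)
          let digits := mx + 2
          let answer := if PySem.List.pyGetD operator i "" = "+" then x + y else x - y
          let space := digits - PySem.List.len (PySem.Int.toChars answer)
          acc ++ List.replicate space.toNat ' ' ++ PySem.Int.toChars answer ++ [' ', ' ', ' ', ' '])
        []
    else []
  if show_answer then
    String.ofList (s0.1 ++ '\n' :: s0.2.1 ++ '\n' :: s0.2.2 ++ '\n' :: answers)
  else
    String.ofList (s0.1 ++ '\n' :: s0.2.1 ++ '\n' :: s0.2.2 ++ ['\n'])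

-- ===== PORT B =====
-- the four per-column cells of Source B's recursion; '%*s' / '%*d' pad with spaces on the left
-- and leave a longer string unchanged, which Nat subtraction's clamping matches exactly
def pvCellT (c : String × String × String) : List Char :=
  List.replicate (max c.1.toList.length c.2.1.toList.length + 2 - c.1.toList.length) ' ' ++
    c.1.toList ++ [' ', ' ', ' ', ' ']

def pvCellB (c : String × String × String) : List Char :=
  c.2.2.toList ++ ' ' ::
    (List.replicate (max c.1.toList.length c.2.1.toList.length - c.2.1.toList.length) ' ' ++
      c.2.1.toList ++ [' ', ' ', ' ', ' '])

def pvCellBan (c : String × String × String) : List Char :=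
  List.replicate (max c.1.toList.length c.2.1.toList.length + 2) '-' ++ [' ', ' ', ' ', ' ']

def pvCellAn (c : String × String × String) : List Char :=
  let x := (PySem.Int.ofStr? c.1).getD 0     -- int(); ValueError excluded by Pre_
  let y := (PySem.Int.ofStr? c.2.1).getD 0
  let r := if c.2.2 = "+" then x + y else x - y
  List.replicate (max (PySem.Int.toChars x).length (PySem.Int.toChars y).length + 2 -
      (PySem.Int.toChars r).length) ' ' ++ PySem.Int.toChars r ++ [' ', ' ', ' ', ' ']

-- Source B's loop body: the 4-field block of one problem
def pvBlock (show_answer : Bool) (c : String × String × String) : List Char × List Char × List Char × List Char :=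
  (pvCellT c, pvCellB c, pvCellBan c, if show_answer then pvCellAn c else [])

def vertical_arranger_alt (num1 : List String) (num2 : List String) (operator : List String) (show_answer : Bool) : String :=
  let blocks := (num1.zip (num2.zip operator)).map (pvBlock show_answer)
  -- zip(*blocks) + ''.join: each line is the concatenation of its row of the transposed blocks
  let top := (blocks.map (fun r => r.1)).flatten
  let bot := (blocks.map (fun r => r.2.1)).flatten
  let ban := (blocks.map (fun r => r.2.2.1)).flatten
  let ans := (blocks.map (fun r => r.2.2.2)).flatten
  String.ofList (top ++ '\n' :: bot ++ '\n' :: ban ++ '\n' :: ans)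

-- ===== PRECONDITION & SPEC =====
-- Pre_ is exactly where the Python A returns: num2 and operator must be at least as long as num1
-- (else IndexError), and with show_answer every used entry of num1/num2 must parse as int()
-- (else ValueError).
def Pre_vertical_arranger (num1 : List String) (num2 : List String) (operator : List String) (show_answer : Bool) : Prop :=
  num1.length ≤ num2.length ∧ num1.length ≤ operator.length ∧
  (show_answer = true →
    (num1.all (fun s => (PySem.Int.ofStr? s).isSome) &&
     (num2.take num1.length).all (fun s => (PySem.Int.ofStr? s).isSome)) = true)
instance (num1 : List String) (num2 : List String) (operator : List String) (show_answer : Bool) : Decidable (Pre_vertical_arranger num1 num2 operator show_answer) := by unfold Pre_vertical_arranger; infer_instance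

def pvWitness_vertical_arranger : List String × List String × List String × Bool :=
  (["12", "400"], ["7", "052"], ["+", "-"], true)

def Spec_vertical_arranger (num1 : List String) (num2 : List String) (operator : List String) (show_answer : Bool) (out : String) : Prop := out = vertical_arranger_alt num1 num2 operator show_answer
instance (num1 : List String) (num2 : List String) (operator : List String) (show_answer : Bool) (out : String) : Decidable (Spec_vertical_arranger num1 num2 operator show_answer out) := by unfold Spec_vertical_arranger; infer_instance

-- ===== CLAIM (what is proved, stated in full; the proofs are below) =====
def Claim_equal_vertical_arranger : Prop := ∀ (num1 : List String) (num2 : List String) (operator : List String) (show_answer : Bool), Dom_vertical_arranger num1 num2 operator show_answer → Pre_vertical_arranger num1 num2 operator show_answer → Spec_vertical_arranger num1 num2 operator show_answer (vertical_arranger num1 num2 operator show_answer)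

-- ===== LEMMAS AND PROOFS =====

-- A's triple-accumulator loop over range(m) appends a per-index segment to each component.
theorem pvTripleFold (step : (List Char × List Char × List Char) → Nat → (List Char × List Char × List Char))
    (t b n : Nat → List Char)
    (hstep : ∀ acc k, step acc k = (acc.1 ++ t k, acc.2.1 ++ b k, acc.2.2 ++ n k)) :
    ∀ (m : Nat) (x y z : List Char),
      (List.range m).foldl step (x, y, z) =
        (x ++ ((List.range m).map t).flatten,
         y ++ ((List.range m).map b).flatten,
         z ++ ((List.range m).map n).flatten) := by
  intro m
  induction m with
  | zero => intro x y z; simp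
  | succ m ih =>
    intro x y z
    simp [List.range_succ, List.foldl_append, ih, hstep, List.append_assoc]

-- A's answers loop over range(m) appends a per-index segment.
theorem pvSingleFold (step : List Char → Nat → List Char) (t : Nat → List Char)
    (hstep : ∀ acc k, step acc k = acc ++ t k) :
    ∀ (m : Nat) (x : List Char),
      (List.range m).foldl step x = x ++ ((List.range m).map t).flatten := by
  intro m
  induction m with
  | zero => intro x; simp
  | succ m ih =>
    intro x
    simp [List.range_succ, List.foldl_append, ih, hstep, List.append_assoc]

theorem pvMaxLenChain_eq (a b : List Char) :
    pvMaxLenChain a b = ((max a.length b.length : Nat) : Int) := by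
  simp only [pvMaxLenChain, PySem.List.len_eq]
  split_ifs with h1 h2 <;> omega

theorem pvTop_col (a b : List Char) :
    (if PySem.List.len a ≥ PySem.List.len b then [' ', ' '] ++ a
     else List.replicate (2 + PySem.List.len b - PySem.List.len a).toNat ' ' ++ a) =
    List.replicate (max a.length b.length + 2 - a.length) ' ' ++ a := by
  simp only [PySem.List.len_eq]
  split_ifs with h
  · have : max a.length b.length + 2 - a.length = 2 := by omega
    rw [this]; rfl
  · have h' : (2 + (b.length:Int) - (a.length:Int)).toNat = max a.length b.length + 2 - a.length := by omega
    rw [h']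

theorem pvBot_col (a b op : List Char) :
    (if PySem.List.len b ≥ PySem.List.len a then op ++ [' '] ++ b
     else op ++ [' '] ++ List.replicate (PySem.List.len a - PySem.List.len b).toNat ' ' ++ b) =
    op ++ ' ' :: (List.replicate (max a.length b.length - b.length) ' ' ++ b) := by
  simp only [PySem.List.len_eq]
  split_ifs with h
  · have : max a.length b.length - b.length = 0 := by omega
    rw [this]; simp
  · have h' : ((a.length:Int) - (b.length:Int)).toNat = max a.length b.length - b.length := by omega
    rw [h']; simp

theorem pvAns_col (a b op : String) :
    List.replicate
        (pvMaxLenChain (PySem.Int.toChars ((PySem.Int.ofStr? a).getD 0))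
              (PySem.Int.toChars ((PySem.Int.ofStr? b).getD 0)) + 2 -
          PySem.List.len (PySem.Int.toChars
            (if op = "+" then (PySem.Int.ofStr? a).getD 0 + (PySem.Int.ofStr? b).getD 0
             else (PySem.Int.ofStr? a).getD 0 - (PySem.Int.ofStr? b).getD 0))).toNat ' ' ++
      PySem.Int.toChars
        (if op = "+" then (PySem.Int.ofStr? a).getD 0 + (PySem.Int.ofStr? b).getD 0
         else (PySem.Int.ofStr? a).getD 0 - (PySem.Int.ofStr? b).getD 0) ++ [' ', ' ', ' ', ' ']
      = pvCellAn (a, b, op) := by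
  simp only [pvCellAn, pvMaxLenChain_eq, PySem.List.len_eq]
  congr 3
  omega

-- zip of three lists read by index, as a map over range (lengths at least num1's)
theorem pvZip3_map {α : Type} (f : String × String × String → α)
    (xs ys zs : List String) (h2 : xs.length ≤ ys.length) (h3 : xs.length ≤ zs.length) :
    (xs.zip (ys.zip zs)).map f =
      (List.range xs.length).map (fun k => f (xs.getD k "", ys.getD k "", zs.getD k "")) := by
  apply List.ext_getElem
  · simp; omega
  · intro k hk hk'
    have hx : k < xs.length := by simpa using hk'
    have hy : k < ys.length := by omega
    have hz : k < zs.length := by omega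
    simp [List.getElem_zip, List.getD_eq_getElem?_getD, hx, hy, hz]

theorem vertical_arranger_eq (num1 num2 operator : List String) (show_answer : Bool)
    (h2 : num1.length ≤ num2.length) (h3 : num1.length ≤ operator.length) :
    vertical_arranger num1 num2 operator show_answer =
      vertical_arranger_alt num1 num2 operator show_answer := by
  unfold vertical_arranger vertical_arranger_alt
  rw [show PySem.List.len num1 = (num1.length : Int) from PySem.List.len_eq num1,
      PySem.List.pyRange_zero_nat num1.length]
  simp only [List.foldl_map, PySem.List.pyGetD_natCast]
  rw [pvTripleFold _
        (fun k => pvCellT (num1.getD k "", num2.getD k "", operator.getD k ""))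
        (fun k => pvCellB (num1.getD k "", num2.getD k "", operator.getD k ""))
        (fun k => pvCellBan (num1.getD k "", num2.getD k "", operator.getD k ""))
        (by
          intro acc k
          rw [pvTop_col, pvBot_col, pvMaxLenChain_eq]
          simp only [pvCellT, pvCellB, pvCellBan]
          simp [List.append_assoc]
          omega)]
  rw [pvSingleFold _
        (fun k => pvCellAn (num1.getD k "", num2.getD k "", operator.getD k ""))
        (by
          intro acc k
          beta_reduce
          rw [← pvAns_col]
          simp [List.append_assoc])]
  simp only [List.map_map, Function.comp_def, pvBlock]
  rw [pvZip3_map (fun c => pvCellT c) num1 num2 operator h2 h3,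
      pvZip3_map (fun c => pvCellB c) num1 num2 operator h2 h3,
      pvZip3_map (fun c => pvCellBan c) num1 num2 operator h2 h3,
      pvZip3_map (fun c => if show_answer then pvCellAn c else []) num1 num2 operator h2 h3]
  cases show_answer with
  | false => simp
  | true => simp

-- ===== VERDICT (by name: the statement is the Claim_ definition above) =====
theorem vertical_arranger_spec : Claim_equal_vertical_arranger := by
  intro num1 num2 operator show_answer _ hpre
  exact vertical_arranger_eq num1 num2 operator show_answer hpre.1 hpre.2.1
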